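-- pv_equiv track=rewrite | github.com/david-sabljic/projekat-problem-lokacija | pohlepni algoritam/pohlepni.py | pomocna_rangiranje
-- ===== SOURCE A (Python) =====
-- def pomocna_rangiranje(tacke,vrijednosti):
--     """ Pomocna funckija koja pronalazi ukupnu vrijednost """
--     pomocna = 0
--     for k in tacke:
--         for j in vrijednosti:
--             if( k[0] == j[0][0] and k[1] == j[0][1]):
--                 pomocna+=j[1]
--                 break;
--     return pomocna
-- ===== SOURCE B (Python) =====
-- def pomocna_rangiranje(tacke, vrijednosti):
--     """Pomocna funckija koja pronalazi ukupnu vrijednost"""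
--     # Inverted traversal: count the points per coordinate key once, then make a
--     # single pass over vrijednosti, crediting each key's FIRST entry with
--     # value * (number of points carrying that key).
--     broj = {}
--     for k in tacke:
--         key = tuple(k[:2])
--         broj[key] = broj.get(key, 0) + 1
--     ukupno = 0
--     videno = set()
--     for j in vrijednosti:
--         key = tuple(j[0][:2])
--         if key not in videno:
--             videno.add(key)
--             ukupno += j[1] * broj.get(key, 0)
--     return ukupno
-- ===== Notes on version B (the rewrite author's own statement) =====
-- stated objective: alternative
-- what changed: Inverts the traversal: instead of scanning vrijednosti once per point, B counts points per coordinate key in one pass, then makes a single pass over vrijednosti crediting the first entry of each key with value times that key's point count.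
import Mathlib
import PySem

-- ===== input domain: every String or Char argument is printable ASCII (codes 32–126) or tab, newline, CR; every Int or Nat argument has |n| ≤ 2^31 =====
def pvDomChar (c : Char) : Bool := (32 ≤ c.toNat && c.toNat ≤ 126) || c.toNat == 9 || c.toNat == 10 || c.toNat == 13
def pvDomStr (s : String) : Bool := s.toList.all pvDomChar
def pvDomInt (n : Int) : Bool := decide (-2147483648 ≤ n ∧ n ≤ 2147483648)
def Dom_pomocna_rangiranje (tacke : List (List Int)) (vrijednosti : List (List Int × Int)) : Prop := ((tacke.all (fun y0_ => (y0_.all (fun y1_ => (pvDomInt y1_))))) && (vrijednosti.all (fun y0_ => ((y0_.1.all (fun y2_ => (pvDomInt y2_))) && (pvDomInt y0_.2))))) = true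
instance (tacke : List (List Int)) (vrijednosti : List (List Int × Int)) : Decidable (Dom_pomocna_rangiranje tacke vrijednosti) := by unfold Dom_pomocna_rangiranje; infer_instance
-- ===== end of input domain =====

-- B inverts the traversal: it counts points per coordinate key once, then makes one pass over
-- vrijednosti, crediting the first entry of each key with value * point-count, instead of A's
-- rescan of vrijednosti for every point.

-- ===== PORT A =====
-- the inner 'for j in vrijednosti: … break' loop, threading the accumulator 'pomocna'
def pvInnerA (k : List Int) : List (List Int × Int) → Int → Int
  | [], pomocna => pomocna
  | j :: rest, pomocna =>
      if PySem.List.pyGet? k 0 = PySem.List.pyGet? j.1 0 ∧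
         PySem.List.pyGet? k 1 = PySem.List.pyGet? j.1 1 then
        pomocna + j.2
      else
        pvInnerA k rest pomocna

def pomocna_rangiranje (tacke : List (List Int)) (vrijednosti : List (List Int × Int)) : Int :=
  tacke.foldl (fun pomocna k => pvInnerA k vrijednosti pomocna) 0

-- ===== PORT B =====
-- tuple(ks[:2]) — the coordinate key
def pvKeyB (ks : List Int) : List Int := PySem.List.slice ks none (some 2)

-- broj[key] = broj.get(key, 0) + 1 over tacke
def pvCntB (tacke : List (List Int)) : PySem.Dict (List Int) Int :=
  tacke.foldl (fun d k => d.insert (pvKeyB k) (d.getD (pvKeyB k) 0 + 1)) PySem.Dict.empty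

-- the body of B's single pass over vrijednosti: state = (ukupno, videno)
def pvStepB (cnt : PySem.Dict (List Int) Int) (st : Int × PySem.Set (List Int))
    (j : List Int × Int) : Int × PySem.Set (List Int) :=
  if PySem.Set.contains st.2 (pvKeyB j.1) then st
  else (st.1 + j.2 * cnt.getD (pvKeyB j.1) 0, PySem.Set.add st.2 (pvKeyB j.1))

def pomocna_rangiranje_alt (tacke : List (List Int)) (vrijednosti : List (List Int × Int)) : Int :=
  let cnt := pvCntB tacke
  (vrijednosti.foldl (pvStepB cnt) (0, PySem.Set.empty)).1

-- ===== PRECONDITION & SPEC =====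
-- A raises IndexError exactly when some point's scan reaches (before any full two-coordinate match)
-- an entry whose key list is empty, or a half-match where the point or the key has fewer than 2 elements;
-- Pre_ is exactly the complement of that (the inputs on which Python A returns).
def pvPairSafe (k : List Int) (j : List Int × Int) : Prop :=
  j.1 ≠ [] ∧ (k.take 1 = j.1.take 1 → 2 ≤ k.length ∧ 2 ≤ j.1.length)
def pvFullMatch (k : List Int) (j : List Int × Int) : Prop :=
  2 ≤ k.length ∧ 2 ≤ j.1.length ∧ k.take 2 = j.1.take 2
def Pre_pomocna_rangiranje (tacke : List (List Int)) (vrijednosti : List (List Int × Int)) : Prop :=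
  ∀ k ∈ tacke, vrijednosti = [] ∨ (k ≠ [] ∧ ∀ i : Fin vrijednosti.length,
    (∀ i' : Fin vrijednosti.length, i'.1 < i.1 → ¬ pvFullMatch k vrijednosti[i']) →
      pvPairSafe k vrijednosti[i])
instance (tacke : List (List Int)) (vrijednosti : List (List Int × Int)) : Decidable (Pre_pomocna_rangiranje tacke vrijednosti) := by unfold Pre_pomocna_rangiranje pvPairSafe pvFullMatch; infer_instance

def pvWitness_pomocna_rangiranje : List (List Int) × (List (List Int × Int)) :=
  ([[1, 2], [3, 4], [9, 9]], [([1, 2], 5), ([3, 4], 7)])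

def Spec_pomocna_rangiranje (tacke : List (List Int)) (vrijednosti : List (List Int × Int)) (out : Int) : Prop := out = pomocna_rangiranje_alt tacke vrijednosti
instance (tacke : List (List Int)) (vrijednosti : List (List Int × Int)) (out : Int) : Decidable (Spec_pomocna_rangiranje tacke vrijednosti out) := by unfold Spec_pomocna_rangiranje; infer_instance

-- ===== CLAIM (what is proved, stated in full; the proofs are below) =====
def Claim_equal_pomocna_rangiranje : Prop := ∀ (tacke : List (List Int)) (vrijednosti : List (List Int × Int)), Dom_pomocna_rangiranje tacke vrijednosti → Pre_pomocna_rangiranje tacke vrijednosti → Spec_pomocna_rangiranje tacke vrijednosti (pomocna_rangiranje tacke vrijednosti)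

-- ===== LEMMAS AND PROOFS =====

theorem pvKeyB_eq_take (ks : List Int) : pvKeyB ks = ks.take 2 := by
  simpa using PySem.List.slice_to_natCast ks 2

-- A's pairwise coordinate test agrees with equality of the first-two-elements keys
theorem pvCond_iff (k j : List Int) :
    (PySem.List.pyGet? k 0 = PySem.List.pyGet? j 0 ∧
     PySem.List.pyGet? k 1 = PySem.List.pyGet? j 1) ↔ k.take 2 = j.take 2 := by
  have h0 : ∀ n : Nat, (0:Int) ≤ (n:Int) + 1 := fun n => by positivity
  rcases k with _ | ⟨a, _ | ⟨a2, as⟩⟩ <;> rcases j with _ | ⟨b, _ | ⟨b2, bs⟩⟩ <;>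
    simp [PySem.List.pyGet?, PySem.List.pyIdx?, h0]

-- first match of a key in the list, in order
def pvFind (key : List Int) : List (List Int × Int) → Option Int
  | [] => none
  | j :: rest => if pvKeyB j.1 = key then some j.2 else pvFind key rest

theorem pvInnerA_eq_find (k : List Int) (vs : List (List Int × Int)) (acc : Int) :
    pvInnerA k vs acc = acc + (pvFind (pvKeyB k) vs).getD 0 := by
  induction vs with
  | nil => simp [pvInnerA, pvFind]
  | cons j rest ih =>
    simp only [pvInnerA, pvFind]
    by_cases h : PySem.List.pyGet? k 0 = PySem.List.pyGet? j.1 0 ∧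
        PySem.List.pyGet? k 1 = PySem.List.pyGet? j.1 1
    · have hk : pvKeyB j.1 = pvKeyB k := by
        rw [pvKeyB_eq_take, pvKeyB_eq_take]
        exact ((pvCond_iff k j.1).mp h).symm
      simp [h, hk]
    · have hk : ¬ pvKeyB j.1 = pvKeyB k := by
        rw [pvKeyB_eq_take, pvKeyB_eq_take]
        intro hx
        exact h ((pvCond_iff k j.1).mpr hx.symm)
      simp [h, hk, ih]

-- A's result is the per-point sum of first matches
theorem pvA_eq_sum (tacke : List (List Int)) (vs : List (List Int × Int)) (t : Int) :
    tacke.foldl (fun pomocna k => pvInnerA k vs pomocna) t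
      = t + (tacke.map (fun k => (pvFind (pvKeyB k) vs).getD 0)).sum := by
  induction tacke generalizing t with
  | nil => simp
  | cons k ks ih =>
    rw [List.foldl_cons, pvInnerA_eq_find, ih, List.map_cons, List.sum_cons]
    ring

-- the counter dict really counts point keys
theorem pvCntB_getD (tacke : List (List Int)) (key : List Int) :
    (pvCntB tacke).getD key 0 = ((tacke.map pvKeyB).count key : Int) := by
  have h : pvCntB tacke = PySem.Dict.counter (tacke.map pvKeyB) := by
    rw [pvCntB, ← PySem.Dict.foldl_insert_getD_add_one_eq_counter, List.foldl_map]
  rw [h, PySem.Dict.getD_counter]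

-- the per-point contribution still owed after 'seen' keys have been credited
def pvRest (seen : PySem.Set (List Int)) (vs : List (List Int × Int)) (k : List Int) : Int :=
  if PySem.Set.contains seen (pvKeyB k) then 0 else (pvFind (pvKeyB k) vs).getD 0

-- splitting off one fresh vrijednosti entry from the owed sum
theorem pvSum_split (tacke : List (List Int)) (seen : PySem.Set (List Int))
    (j : List Int × Int) (rest : List (List Int × Int))
    (hj : pvKeyB j.1 ∉ seen) :
    (tacke.map (pvRest seen (j :: rest))).sum
      = j.2 * ((tacke.map pvKeyB).count (pvKeyB j.1) : Int)
        + (tacke.map (pvRest (PySem.Set.add seen (pvKeyB j.1)) rest)).sum := by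
  induction tacke with
  | nil => simp
  | cons k ks ih =>
    simp only [List.map_cons, List.sum_cons, List.count_cons, ih]
    by_cases hk : pvKeyB k = pvKeyB j.1
    · simp only [pvRest, pvFind, hk]
      simp [hj]
      ring
    · have hne : ¬ pvKeyB j.1 = pvKeyB k := fun h => hk h.symm
      simp only [pvRest, pvFind]
      simp [hk, hne, PySem.Set.mem_add]
      ring

-- B's single pass computes the owed sum
theorem pvFold_eq (tacke : List (List Int)) (vs : List (List Int × Int))
    (t : Int) (seen : PySem.Set (List Int)) :
    (vs.foldl (pvStepB (pvCntB tacke)) (t, seen)).1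
      = t + (tacke.map (pvRest seen vs)).sum := by
  induction vs generalizing t seen with
  | nil =>
    have h : pvRest seen [] = fun _ => 0 := by funext k; simp [pvRest, pvFind]
    simp [h]
  | cons j rest ih =>
    simp only [List.foldl_cons, pvStepB]
    by_cases hc : pvKeyB j.1 ∈ seen
    · have hrw : ∀ k, pvRest seen (j :: rest) k = pvRest seen rest k := by
        intro k
        by_cases hk : pvKeyB k ∈ seen
        · simp [pvRest, hk]
        · have hne : ¬ pvKeyB j.1 = pvKeyB k := fun h => hk (h ▸ hc)
          simp [pvRest, pvFind, hk, hne]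
      rw [if_pos (by simpa using hc), ih,
        List.map_congr_left (fun k (_ : k ∈ tacke) => hrw k)]
    · rw [if_neg (by simpa using hc), ih,
        pvSum_split tacke seen j rest hc, pvCntB_getD]
      ring

-- ===== VERDICT (by name: the statement is the Claim_ definition above) =====
theorem pomocna_rangiranje_spec : Claim_equal_pomocna_rangiranje := by
  intro tacke vrijednosti _ _
  unfold Spec_pomocna_rangiranje pomocna_rangiranje pomocna_rangiranje_alt
  rw [pvA_eq_sum, pvFold_eq]
  have h : pvRest PySem.Set.empty vrijednosti
      = fun k => (pvFind (pvKeyB k) vrijednosti).getD 0 := by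
    funext k; simp [pvRest, PySem.Set.empty]
  rw [h]
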